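-- pv_equiv track=rewrite | github.com/Thomas1er/Demineur | Demineur_bot2.py | partitions
-- ===== SOURCE A (Python) =====
-- import itertools
--
-- def partitions(N, p):
--     # Assurer que les valeurs de N et p sont valides
--     p = int(p)
--     if p > N or p < 0:
--         return []
--
--     # Générer l'ensemble de base [1, N]
--     base_set = list(range(1, N + 1))
--
--     # Trouver toutes les combinaisons de p éléments dans base_set
--     comb = itertools.combinations(base_set, p)
--
--     partitions = []
--     for c in comb:
--         subset1 = set(c)
--         subset2 = set(base_set) - subset1
--         partitions.append((subset1, subset2))
--
--     return partitions
-- ===== SOURCE B (Python) =====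
-- def partitions(N, p):
--     # Iterative depth-first include/exclude enumeration with an explicit stack of
--     # immutable linked lists (instead of itertools.combinations + a set difference
--     # per combination): walk 1..N in order, building subset and complement together.
--     p = int(p)
--     if p > N or p < 0:
--         return []
--
--     base = list(range(1, N + 1))
--     result = []
--     stack = [(0, p, None, None)]        # (index, still to choose, chosen, excluded)
--     while stack:
--         i, k, chosen, rest = stack.pop()
--         if k == 0:
--             s1 = []
--             node = chosen
--             while node is not None:
--                 s1.append(node[0])
--                 node = node[1]
--             s1.reverse()
--             s2 = []
--             node = rest
--             while node is not None:
--                 s2.append(node[0])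
--                 node = node[1]
--             s2.reverse()
--             result.append((set(s1), set(s2 + base[i:])))
--         elif k <= len(base) - i:     # otherwise too few elements remain: dead branch
--             x = base[i]
--             stack.append((i + 1, k, chosen, (x, rest)))      # exclude x (visited second)
--             stack.append((i + 1, k - 1, (x, chosen), rest))  # include x (visited first)
--     return result
-- ===== Notes on version B (the rewrite author's own statement) =====
-- stated objective: alternative
-- what changed: Replaces itertools.combinations plus a per-combination set difference with an iterative depth-first include/exclude walk over 1..N (explicit stack of immutable linked lists) that builds each subset and its complement together in one pass.
import Mathlib
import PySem

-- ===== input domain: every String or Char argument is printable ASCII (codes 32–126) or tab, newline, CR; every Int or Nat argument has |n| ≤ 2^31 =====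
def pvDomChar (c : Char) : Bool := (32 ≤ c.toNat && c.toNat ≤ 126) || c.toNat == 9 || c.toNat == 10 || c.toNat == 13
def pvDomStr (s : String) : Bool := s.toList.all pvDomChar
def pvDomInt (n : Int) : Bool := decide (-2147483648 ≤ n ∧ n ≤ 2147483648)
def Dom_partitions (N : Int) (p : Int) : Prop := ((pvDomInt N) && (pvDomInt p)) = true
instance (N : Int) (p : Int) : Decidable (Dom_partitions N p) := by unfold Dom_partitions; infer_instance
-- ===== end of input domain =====

-- B replaces itertools.combinations + a per-combination set difference with an iterative
-- depth-first include/exclude walk over 1..N (explicit stack of linked lists) that builds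
-- each subset and its complement together (objective: alternative).

-- ===== PORT A =====
-- itertools.combinations over a list, in itertools' lexicographic order
def pvCombs (k : Nat) (xs : List Int) : List (List Int) :=
  match k, xs with
  | 0, _ => [[]]
  | _ + 1, [] => []
  | k + 1, x :: rest => (pvCombs k rest).map (fun c => x :: c) ++ pvCombs (k + 1) rest

def partitions (N : Int) (p : Int) : List (List Int × List Int) :=
  if p > N ∨ p < 0 then []
  else
    let baseSet := PySem.List.pyRange 1 (N + 1) 1
    (pvCombs p.toNat baseSet).foldl
      (fun acc c =>
        let subset1 : PySem.Set Int := PySem.Set.ofList c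
        let subset2 : PySem.Set Int := PySem.Set.diff (PySem.Set.ofList baseSet) subset1
        acc ++ [(subset1, subset2)]) []

-- ===== PORT B =====
-- the while loop of Source B; a stack entry is (i, k, chosen, rest), chosen/rest being the
-- linked lists (most recent element first); s1/s2 are unwound (= the Lean list) and reversed
def pvLoop (base : List Int) (stack : List (Nat × Nat × List Int × List Int))
    (result : List (List Int × List Int)) : List (List Int × List Int) :=
  match stack with
  | [] => result
  | (i, k, chosen, rest) :: st =>
    match k with
    | 0 =>
      pvLoop base st
        (result ++ [(PySem.Set.ofList chosen.reverse,
                     PySem.Set.ofList (rest.reverse ++ base.drop i))])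
    | k + 1 =>
      if h : k + 1 ≤ base.length - i then
        pvLoop base
          ((i + 1, k, base[i]'(by omega) :: chosen, rest) ::
           (i + 1, k + 1, chosen, base[i]'(by omega) :: rest) :: st) result
      else pvLoop base st result
termination_by (stack.map (fun e => 3 ^ (base.length + 1 - e.1))).sum
decreasing_by
  · simp only [List.map_cons, List.sum_cons]
    have h3 : 0 < 3 ^ (base.length + 1 - i) := by positivity
    omega
  · simp only [List.map_cons, List.sum_cons]
    have hi : i < base.length := by omega
    have e1 : base.length + 1 - i = (base.length - i) + 1 := by omega
    have e2 : base.length + 1 - (i + 1) = base.length - i := by omega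
    rw [e1, e2, pow_succ]
    have h3 : 0 < 3 ^ (base.length - i) := by positivity
    omega
  · simp only [List.map_cons, List.sum_cons]
    have h3 : 0 < 3 ^ (base.length + 1 - i) := by positivity
    omega

def partitions_alt (N : Int) (p : Int) : List (List Int × List Int) :=
  if p > N ∨ p < 0 then []
  else pvLoop (PySem.List.pyRange 1 (N + 1) 1) [(0, p.toNat, [], [])] []

-- ===== PRECONDITION & SPEC =====
def Spec_partitions (N : Int) (p : Int) (out : List (List Int × List Int)) : Prop := out = partitions_alt N p
instance (N : Int) (p : Int) (out : List (List Int × List Int)) : Decidable (Spec_partitions N p out) := by unfold Spec_partitions; infer_instance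

-- ===== CLAIM (what is proved, stated in full; the proofs are below) =====
def Claim_equal_partitions : Prop := ∀ (N : Int) (p : Int), Dom_partitions N p → Spec_partitions N p (partitions N p)

-- ===== LEMMAS AND PROOFS =====

-- proof-side recursive description of one include/exclude subtree
def pvPartsGo (elems : List Int) (k : Nat) (chosen rest : List Int) :
    List (List Int × List Int) :=
  match k, elems with
  | 0, es => [(PySem.Set.ofList chosen, PySem.Set.ofList (rest ++ es))]
  | _ + 1, [] => []
  | k + 1, x :: tail =>
      pvPartsGo tail k (chosen ++ [x]) rest ++ pvPartsGo tail (k + 1) chosen (rest ++ [x])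

-- every element of a k-combination of xs is an element of xs
theorem pvCombs_subset {k : Nat} {xs c : List Int} (hc : c ∈ pvCombs k xs) :
    ∀ y ∈ c, y ∈ xs := by
  induction xs generalizing k c with
  | nil =>
    cases k with
    | zero => simp [pvCombs] at hc; simp [hc]
    | succ k => simp [pvCombs] at hc
  | cons x rest ih =>
    cases k with
    | zero => simp [pvCombs] at hc; simp [hc]
    | succ k =>
      simp only [pvCombs, List.mem_append, List.mem_map] at hc
      rcases hc with ⟨c', hc', rfl⟩ | hc
      · intro y hy
        rcases List.mem_cons.mp hy with rfl | hy
        · exact List.mem_cons_self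
        · exact List.mem_cons_of_mem _ (ih hc' y hy)
      · intro y hy
        exact List.mem_cons_of_mem _ (ih hc y hy)

-- a subtree with more elements demanded than available is empty
theorem pvPartsGo_nil_of_lt (elems : List Int) :
    ∀ (k : Nat) (s1 s2 : List Int), elems.length < k → pvPartsGo elems k s1 s2 = [] := by
  induction elems with
  | nil =>
    intro k s1 s2 hk
    cases k with
    | zero => omega
    | succ k => rfl
  | cons x tail ih =>
    intro k s1 s2 hk
    cases k with
    | zero => simp at hk
    | succ k =>
      simp only [pvPartsGo, List.append_eq_nil_iff]
      constructor
      · exact ih k (s1 ++ [x]) s2 (by simpa using hk)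
      · exact ih (k + 1) s1 (s2 ++ [x]) (by simp at hk ⊢; omega)

-- the core invariant: the include/exclude walk equals the combinations-plus-filter form
theorem pvPartsGo_eq (xs : List Int) (hnd : xs.Nodup) :
    ∀ (k : Nat) (s1 s2 : List Int),
      pvPartsGo xs k s1 s2 =
        (pvCombs k xs).map (fun c =>
          (PySem.Set.ofList (s1 ++ c),
           PySem.Set.ofList (s2 ++ xs.filter (fun y => !c.contains y)))) := by
  induction xs with
  | nil =>
    intro k s1 s2
    cases k with
    | zero => simp [pvPartsGo, pvCombs]
    | succ k => simp [pvPartsGo, pvCombs]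
  | cons x rest ih =>
    intro k s1 s2
    have hx : x ∉ rest := (List.nodup_cons.mp hnd).1
    have hrest : rest.Nodup := (List.nodup_cons.mp hnd).2
    cases k with
    | zero =>
      simp only [pvPartsGo, pvCombs, List.map_cons, List.map_nil]
      simp
    | succ k =>
      simp only [pvPartsGo, pvCombs, List.map_append, List.map_map]
      congr 1
      · -- include branch
        rw [ih hrest k (s1 ++ [x]) s2]
        apply List.map_congr_left
        intro c' hc'
        simp only [Function.comp_apply, List.append_assoc, List.singleton_append]
        congr 2
        -- (x :: rest).filter (∉ x :: c') = rest.filter (∉ c')  since x ∈ x :: c' and x ∉ rest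
        simp only [List.filter_cons, List.contains_cons, BEq.rfl, Bool.true_or, Bool.not_true,
          Bool.false_eq_true, if_false]
        congr 1
        apply List.filter_congr
        intro y hy
        have hyx : y ≠ x := fun h => hx (h ▸ hy)
        simp [hyx]
      · -- exclude branch
        rw [ih hrest (k + 1) s1 (s2 ++ [x])]
        apply List.map_congr_left
        intro c hc
        have hxc : x ∉ c := fun h => hx (pvCombs_subset hc x h)
        -- (x :: rest).filter keeps x, so the complement is (s2 ++ [x]) ++ rest.filter …
        simp only [List.filter_cons]
        simp [hxc, List.append_assoc]

-- the stack loop processes its entries depth-first, each contributing its subtree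
theorem pvLoop_eq (base : List Int) (stack : List (Nat × Nat × List Int × List Int))
    (result : List (List Int × List Int)) :
    pvLoop base stack result =
      result ++ (stack.map (fun e =>
        pvPartsGo (base.drop e.1) e.2.1 e.2.2.1.reverse e.2.2.2.reverse)).flatten := by
  fun_induction pvLoop base stack result with
  | case1 => simp
  | case2 acc i chosen rest st ih =>
    simp only [List.unattach_reverse, List.unattach_attach] at ih
    rw [ih]
    simp [pvPartsGo, List.append_assoc]
  | case3 acc i k chosen rest st h ih =>
    simp only [List.unattach_reverse, List.unattach_attach] at ih
    rw [ih]
    have hi : i < base.length := by omega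
    have hdrop : base.drop i = base[i] :: base.drop (i + 1) := List.drop_eq_getElem_cons hi
    simp only [List.map_cons, List.flatten_cons, hdrop]
    simp [pvPartsGo, List.append_assoc]
  | case4 _ _ _ _ _ _ _ ih =>
    simp only [List.unattach_reverse, List.unattach_attach] at ih
    rw [ih, List.map_cons, List.flatten_cons,
      pvPartsGo_nil_of_lt _ _ _ _ (by simp; omega), List.nil_append]

theorem partitions_eq_alt (N p : Int) : partitions N p = partitions_alt N p := by
  unfold partitions partitions_alt
  by_cases h : p > N ∨ p < 0
  · simp [h]
  · simp only [h, if_false]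
    set base := PySem.List.pyRange 1 (N + 1) 1 with hbase
    have hnd : base.Nodup := PySem.List.nodup_pyRange_one 1 (N + 1)
    rw [PySem.List.foldl_append_singleton_eq_map, pvLoop_eq]
    simp only [List.map_cons, List.map_nil, List.flatten_cons, List.flatten_nil,
      List.reverse_nil, List.drop_zero, List.append_nil, List.nil_append]
    rw [pvPartsGo_eq base hnd p.toNat [] []]
    simp only [List.nil_append]
    apply List.map_congr_left
    intro c hc
    have hcontains : ∀ y, ((PySem.Set.ofList c).contains y) = (c.contains y) := by
      intro y; simp [PySem.Set.mem_ofList]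
    have hdiff : PySem.Set.diff (PySem.Set.ofList base) (PySem.Set.ofList c)
        = base.filter (fun y => !c.contains y) := by
      rw [PySem.Set.ofList_eq_self_of_nodup base hnd]
      show base.filter (fun y => !(PySem.Set.ofList c).contains y)
          = base.filter (fun y => !c.contains y)
      exact List.filter_congr (fun y _ => by rw [hcontains])
    rw [hdiff, PySem.Set.ofList_eq_self_of_nodup _ (hnd.filter _)]

-- ===== VERDICT (by name: the statement is the Claim_ definition above) =====
theorem partitions_spec : Claim_equal_partitions := by
  intro N p _
  unfold Spec_partitions
  exact partitions_eq_alt N p
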